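-- pv_equiv track=rewrite | github.com/RobbinSchuchmann/gcore-content-system-new | app.py | auto_detect_function
-- ===== SOURCE A (Python) =====
-- def auto_detect_function(heading, section_functions, context=None):
--     """Auto-detect the best function based on heading text and context
--
--     Args:
--         heading: The heading text to analyze
--         section_functions: The loaded section functions configuration
--         context: Optional context dict with 'in_faq_section' and 'heading_level'
--     """
--     if not heading:
--         return "generate_definition"
--
--     heading_lower = heading.lower().strip()
--     auto_map = section_functions.get('auto_detection_map', {})
--
--     # Check if we're in FAQ context (H3 after FAQ H2)
--     if context and context.get('in_faq_section') and context.get('heading_level') == 'H3':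
--         # All H3s in FAQ section should use FAQ answer format
--         return "generate_faq_answer"
--
--     # Check for exact matches first
--     for pattern, function in auto_map.items():
--         if heading_lower.startswith(pattern):
--             return function
--
--     # Check for keywords anywhere in heading
--     for pattern, function in auto_map.items():
--         if pattern in heading_lower:
--             return function
--
--     return "generate_definition"
-- ===== SOURCE B (Python) =====
-- def auto_detect_function(heading, section_functions, context=None):
--     """One-pass re-implementation: a single loop over the auto-detection map
--     returns a prefix match immediately and remembers the first substring match
--     for use only if no pattern anywhere is a prefix."""
--     if not heading:
--         return "generate_definition"
--     if context and context.get('in_faq_section') and context.get('heading_level') == 'H3':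
--         return "generate_faq_answer"
--     heading_lower = heading.lower().strip()
--     substring_hit = None
--     for pattern, function in section_functions.get('auto_detection_map', {}).items():
--         if heading_lower.startswith(pattern):
--             return function
--         if substring_hit is None and pattern in heading_lower:
--             substring_hit = function
--     return substring_hit if substring_hit is not None else "generate_definition"
-- ===== Notes on version B (the rewrite author's own statement) =====
-- stated objective: alternative
-- what changed: The two sequential scans of the pattern map (prefix pass, then substring pass) are fused into a single pass that returns on a prefix hit and carries the first substring hit in an accumulator, consulted only after the loop.
import Mathlib
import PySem

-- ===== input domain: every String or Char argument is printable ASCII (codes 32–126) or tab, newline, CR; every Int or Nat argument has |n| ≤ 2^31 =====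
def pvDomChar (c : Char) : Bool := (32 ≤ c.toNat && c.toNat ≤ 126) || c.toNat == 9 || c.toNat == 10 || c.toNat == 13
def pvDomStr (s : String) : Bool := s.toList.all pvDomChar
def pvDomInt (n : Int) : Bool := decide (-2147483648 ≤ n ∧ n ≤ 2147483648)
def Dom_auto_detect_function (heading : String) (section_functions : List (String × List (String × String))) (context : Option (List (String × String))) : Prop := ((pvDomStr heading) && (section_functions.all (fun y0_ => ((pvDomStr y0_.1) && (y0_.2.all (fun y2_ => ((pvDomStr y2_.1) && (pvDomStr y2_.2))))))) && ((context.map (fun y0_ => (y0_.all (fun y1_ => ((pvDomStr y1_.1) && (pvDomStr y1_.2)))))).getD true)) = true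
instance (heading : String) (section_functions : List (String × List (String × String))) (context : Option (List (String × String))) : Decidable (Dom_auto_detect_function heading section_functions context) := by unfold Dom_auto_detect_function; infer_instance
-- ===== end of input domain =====

-- B fuses A's two sequential scans of the pattern map into one pass with an accumulator
-- for the first substring hit (objective: alternative decomposition, same cost).

-- ===== PORT A =====
-- truthiness of `context and context.get('in_faq_section') and context.get('heading_level') == 'H3'`
-- (shared guard: B's Python carries the identical expression)
def pvFaqCtx (context : Option (List (String × String))) : Bool :=
  match context with
  | none => false
  | some d =>
    !d.isEmpty &&
    (match (PySem.Dict.mk d).get? "in_faq_section" with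
     | some v => v != ""
     | none => false) &&
    ((PySem.Dict.mk d).get? "heading_level" == some "H3")

-- first loop of A: `for pattern, function in auto_map.items(): if heading_lower.startswith(pattern): return function`
def pvFindPrefix (hl : String) : List (String × String) → Option String
  | [] => none
  | (p, f) :: rest => if PySem.Str.startswith hl p then some f else pvFindPrefix hl rest

-- second loop of A: `if pattern in heading_lower: return function`
def pvFindSub (hl : String) : List (String × String) → Option String
  | [] => none
  | (p, f) :: rest => if PySem.Str.isIn p hl then some f else pvFindSub hl rest

def auto_detect_function (heading : String) (section_functions : List (String × List (String × String))) (context : Option (List (String × String))) : String :=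
  if heading == "" then "generate_definition"
  else
    let heading_lower := PySem.Str.strip (PySem.Str.lower heading)
    let auto_map := (PySem.Dict.mk section_functions).getD "auto_detection_map" []
    if pvFaqCtx context then "generate_faq_answer"
    else
      match pvFindPrefix heading_lower auto_map with
      | some f => f
      | none =>
        match pvFindSub heading_lower auto_map with
        | some f => f
        | none => "generate_definition"

-- ===== PORT B =====
-- B's single loop: return on a prefix hit, remember the first substring hit
def pvAltLoop (hl : String) (hit : Option String) : List (String × String) → String
  | [] => match hit with | some f => f | none => "generate_definition"
  | (p, f) :: rest =>
    if PySem.Str.startswith hl p then f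
    else pvAltLoop hl (if hit.isNone && PySem.Str.isIn p hl then some f else hit) rest

def auto_detect_function_alt (heading : String) (section_functions : List (String × List (String × String))) (context : Option (List (String × String))) : String :=
  if heading == "" then "generate_definition"
  else if pvFaqCtx context then "generate_faq_answer"
  else
    pvAltLoop (PySem.Str.strip (PySem.Str.lower heading)) none
      ((PySem.Dict.mk section_functions).getD "auto_detection_map" [])

-- ===== PRECONDITION & SPEC =====
def Spec_auto_detect_function (heading : String) (section_functions : List (String × List (String × String))) (context : Option (List (String × String))) (out : String) : Prop := out = auto_detect_function_alt heading section_functions context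
instance (heading : String) (section_functions : List (String × List (String × String))) (context : Option (List (String × String))) (out : String) : Decidable (Spec_auto_detect_function heading section_functions context out) := by unfold Spec_auto_detect_function; infer_instance

-- ===== CLAIM (what is proved, stated in full; the proofs are below) =====
def Claim_equal_auto_detect_function : Prop := ∀ (heading : String) (section_functions : List (String × List (String × String))) (context : Option (List (String × String))), Dom_auto_detect_function heading section_functions context → Spec_auto_detect_function heading section_functions context (auto_detect_function heading section_functions context)

-- ===== LEMMAS AND PROOFS =====
-- B's fused loop computes: the first prefix match if any; otherwise the saved hit;
-- otherwise the first substring match; otherwise the default.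
theorem pvAltLoop_spec (hl : String) (m : List (String × String)) (hit : Option String) :
    pvAltLoop hl hit m =
      match pvFindPrefix hl m with
      | some f => f
      | none =>
        match hit with
        | some s => s
        | none =>
          match pvFindSub hl m with
          | some f => f
          | none => "generate_definition" := by
  induction m generalizing hit with
  | nil => cases hit <;> simp [pvAltLoop, pvFindPrefix, pvFindSub]
  | cons pf rest ih =>
    obtain ⟨p, f⟩ := pf
    by_cases hs : PySem.Str.startswith hl p <;>
      simp only [PySem.Str.startswith_eq] at hs
    · simp [pvAltLoop, pvFindPrefix, hs]
    · cases hit with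
      | some s => simp [pvAltLoop, pvFindPrefix, hs, ih]
      | none =>
        by_cases hi : PySem.Str.isIn p hl <;>
          simp only [PySem.Str.isIn_eq] at hi <;>
          simp [pvAltLoop, pvFindPrefix, pvFindSub, hs, hi, ih]

-- ===== VERDICT (by name: the statement is the Claim_ definition above) =====
theorem auto_detect_function_spec : Claim_equal_auto_detect_function := by
  intro heading section_functions context _
  unfold Spec_auto_detect_function auto_detect_function auto_detect_function_alt
  by_cases h0 : heading == ""
  · simp [h0]
  · by_cases hf : pvFaqCtx context
    · simp [h0, hf]
    · simp [h0, hf, pvAltLoop_spec]
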